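-- pv_equiv track=rewrite | github.com/syncXL/Linear_Algebra | general.py | intertwine
-- ===== SOURCE A (Python) =====
-- def intertwine(fList,sList,stage):
--     temp = fList.copy()
--     nT =1
--     for i in range(len(sList)):
--         ind = (stage *nT) + i
--         temp.insert(ind,sList[i])
--         nT +=1
--     return temp
-- ===== SOURCE B (Python) =====
-- def intertwine(fList, sList, stage):
--     out = []
--     pos = 0
--     for s in sList:
--         out += fList[pos:pos + stage]
--         out.append(s)
--         pos += stage
--     out += fList[pos:]
--     return out
-- ===== Notes on version B (the rewrite author's own statement) =====
-- stated objective: alternative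
-- what changed: A repeatedly calls list.insert into a growing copy of fList (each insert shifts the tail); B never inserts: it builds the result in one forward pass by emitting stage-sized slices of fList between the sList elements.
-- outside the precondition, e.g. on intertwine([1, 2, 3], [10, 20], -2): A returns [1, 20, 10, 2, 3], B returns [1, 10, 20, 1, 2, 3]
import Mathlib
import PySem

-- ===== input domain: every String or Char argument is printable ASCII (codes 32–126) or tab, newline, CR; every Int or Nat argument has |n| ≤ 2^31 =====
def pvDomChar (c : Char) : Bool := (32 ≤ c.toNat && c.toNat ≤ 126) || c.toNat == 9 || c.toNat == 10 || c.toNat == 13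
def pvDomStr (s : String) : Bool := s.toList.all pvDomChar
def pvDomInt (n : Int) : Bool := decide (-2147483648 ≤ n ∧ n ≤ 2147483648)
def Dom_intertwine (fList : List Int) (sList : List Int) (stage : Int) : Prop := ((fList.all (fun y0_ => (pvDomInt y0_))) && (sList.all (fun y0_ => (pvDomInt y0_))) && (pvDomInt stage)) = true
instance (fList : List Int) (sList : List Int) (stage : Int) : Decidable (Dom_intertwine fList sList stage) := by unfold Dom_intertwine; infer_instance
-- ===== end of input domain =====

-- B replaces A's repeated list.insert into a growing copy by a single forward pass that
-- emits stage-sized chunks of fList between the sList elements (return value only; neither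
-- version mutates its arguments).

-- ===== PORT A =====
-- A's for-loop as structural recursion over the remaining sList; state = (temp, nT, i)
def intertwineLoopA (stage : Int) (temp : List Int) (nT : Int) (i : Int) (pending : List Int) : List Int :=
  match pending with
  | [] => temp
  | x :: rest => intertwineLoopA stage (PySem.List.insert temp (stage * nT + i) x) (nT + 1) (i + 1) rest

def intertwine (fList : List Int) (sList : List Int) (stage : Int) : List Int :=
  intertwineLoopA stage fList 1 0 sList

-- ===== PORT B =====
-- Source B's loop over sList as structural recursion; state = (out, pos)
def intertwineLoopB (fList : List Int) (stage : Int) (out : List Int) (pos : Int) (pending : List Int) : List Int :=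
  match pending with
  | [] => out ++ PySem.List.slice fList (some pos) none
  | s :: rest =>
      intertwineLoopB fList stage (out ++ PySem.List.slice fList (some pos) (some (pos + stage)) ++ [s]) (pos + stage) rest

def intertwine_alt (fList : List Int) (sList : List Int) (stage : Int) : List Int :=
  intertwineLoopB fList stage [] 0 sList

-- ===== PRECONDITION & SPEC =====
-- Pre_ excludes negative stage: there every insert index A computes is negative, and Python's
-- negative-index wraparound relative to the growing list places the sList elements in an
-- accidental order (e.g. stacking them in reverse at a fixed slot) that no caller of this
-- interleaving helper would specify; B's forward chunk construction returns a different list there.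
def Pre_intertwine (fList : List Int) (sList : List Int) (stage : Int) : Prop := 0 ≤ stage
instance (fList : List Int) (sList : List Int) (stage : Int) : Decidable (Pre_intertwine fList sList stage) := by unfold Pre_intertwine; infer_instance

def pvWitness_intertwine : List Int × List Int × Int := ([1, 2, 3], [10, 20], 1)

def Spec_intertwine (fList : List Int) (sList : List Int) (stage : Int) (out : List Int) : Prop := out = intertwine_alt fList sList stage
instance (fList : List Int) (sList : List Int) (stage : Int) (out : List Int) : Decidable (Spec_intertwine fList sList stage out) := by unfold Spec_intertwine; infer_instance

-- ===== CLAIM (what is proved, stated in full; the proofs are below) =====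
def Claim_equal_intertwine : Prop := ∀ (fList : List Int) (sList : List Int) (stage : Int), Dom_intertwine fList sList stage → Pre_intertwine fList sList stage → Spec_intertwine fList sList stage (intertwine fList sList stage)

-- ===== LEMMAS AND PROOFS =====

-- common recursive specification of the interleaving: chunks of size s' between the sList elements
def iSpec (s' : Nat) : List Int → List Int → List Int
  | L, [] => L
  | L, x :: ss => L.take s' ++ x :: iSpec s' (L.drop s') ss

-- Python list.insert at a nonnegative index clamps to the length
theorem insert_clamp (xs : List Int) (p : Nat) (x : Int) :
    PySem.List.insert xs (p : Int) x
      = xs.take (min p xs.length) ++ x :: xs.drop (min p xs.length) := by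
  have h : ¬ ((p : Int) < 0) := by omega
  simp only [PySem.List.insert, PySem.List.sliceIndices, if_neg h,
    show ¬ ((1 : Int) < 0) by omega, if_false]
  have h2 : (min (p : Int) (xs.length : Int)).toNat = min p xs.length := by omega
  rw [h2]

theorem loopB_eq (fList : List Int) (s' : Nat) (ss : List Int) :
    ∀ (out : List Int) (pos : Nat),
      intertwineLoopB fList (s' : Int) out (pos : Int) ss
        = out ++ iSpec s' (fList.drop pos) ss := by
  induction ss with
  | nil =>
      intro out pos
      simp [intertwineLoopB, iSpec, PySem.List.slice_from_natCast]
  | cons x rest ih =>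
      intro out pos
      rw [intertwineLoopB, PySem.List.slice_natCast_add,
        show (pos : Int) + (s' : Int) = ((pos + s' : Nat) : Int) by push_cast; ring,
        ih, iSpec]
      rw [List.drop_drop]
      simp [List.append_assoc]

theorem loopA_eq (fList : List Int) (s' : Nat) (ss : List Int) :
    ∀ (k : Nat) (P : List Int),
      P.length = min (s' * k) fList.length + k →
      intertwineLoopA (s' : Int) (P ++ fList.drop (min (s' * k) fList.length)) ((k : Int) + 1) (k : Int) ss
        = P ++ iSpec s' (fList.drop (min (s' * k) fList.length)) ss := by
  induction ss with
  | nil => intro k P _; rfl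
  | cons x rest ih =>
      intro k P hP
      have hsucc : s' * (k + 1) = s' * k + s' := Nat.mul_succ s' k
      set n := fList.length with hn
      set D := fList.drop (min (s' * k) n) with hDdef
      have hDlen : D.length = n - min (s' * k) n := by rw [hDdef]; simp [hn]
      have hlen : (P ++ D).length = n + k := by
        rw [List.length_append, hP, hDlen]; omega
      rw [intertwineLoopA,
        show (s' : Int) * ((k : Int) + 1) + (k : Int) = ((s' * (k + 1) + k : Nat) : Int) by push_cast; ring,
        insert_clamp]
      have hmin : min (s' * (k + 1) + k) (P ++ D).length
          = P.length + (min (s' * (k + 1)) n - min (s' * k) n) := by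
        rw [hlen, hP]; omega
      set t := min (s' * (k + 1)) n - min (s' * k) n with htdef
      have h1 : D.take t = D.take s' := by
        rcases Nat.lt_or_ge n (s' * (k + 1)) with h | h
        · rw [List.take_of_length_le (by omega), List.take_of_length_le (by omega)]
        · rw [show t = s' by omega]
      have h2 : D.drop t = D.drop s' := by
        rcases Nat.lt_or_ge n (s' * (k + 1)) with h | h
        · rw [List.drop_of_length_le (by omega), List.drop_of_length_le (by omega)]
        · rw [show t = s' by omega]
      have h3 : fList.drop (min (s' * (k + 1)) n) = D.drop s' := by
        rcases Nat.lt_or_ge n (s' * (k + 1)) with h | h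
        · rw [List.drop_of_length_le (by rw [← hn]; omega),
            List.drop_of_length_le (by omega)]
        · rw [hDdef, List.drop_drop]; congr 1; omega
      have hP' : (P ++ D.take s' ++ [x]).length = min (s' * (k + 1)) n + (k + 1) := by
        simp [hP, hDlen]; omega
      rw [hmin, List.take_append, List.drop_append,
        List.take_of_length_le (Nat.le_add_right _ _),
        List.drop_of_length_le (Nat.le_add_right _ _),
        Nat.add_sub_cancel_left, h1, h2]
      have harg : (P ++ D.take s') ++ x :: ([] ++ D.drop s')
          = (P ++ D.take s' ++ [x]) ++ fList.drop (min (s' * (k + 1)) n) := by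
        rw [h3]; simp
      rw [harg,
        show (k : Int) + 1 = ((k + 1 : Nat) : Int) by push_cast; ring,
        ih (k + 1) (P ++ D.take s' ++ [x]) hP', h3, iSpec]
      simp

-- ===== VERDICT (by name: the statement is the Claim_ definition above) =====
theorem intertwine_spec : Claim_equal_intertwine := by
  intro fList sList stage _hdom hpre
  unfold Spec_intertwine intertwine intertwine_alt
  rw [show stage = ((stage.toNat : Nat) : Int) from (Int.toNat_of_nonneg hpre).symm]
  have hA := loopA_eq fList stage.toNat sList 0 [] (by simp)
  have hB := loopB_eq fList stage.toNat sList [] 0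
  simp only [Nat.mul_zero, Nat.zero_min, List.drop_zero, List.nil_append,
    Nat.cast_zero, zero_add] at hA hB
  rw [hA, hB]
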